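-- pv_equiv track=rewrite | github.com/Artem2690/dtek-schedule-bot | bot.py | format_schedule_halfhour
-- ===== SOURCE A (Python) =====
-- def format_schedule_halfhour(day_gpv: dict) -> str:
--     """
--     day_gpv: {"1":"yes"/"no"/"first"/"second", ... "24":...}
--     Interpret hour h as interval (h-1):00 -> h:00.
--     first/second are treated as half-hour transition at (h-1):30:
--       first half = prev yes/no, second half = next yes/no
--     """
--
--     def prev_yesno(h):
--         for hh in range(h - 1, 0, -1):
--             v = day_gpv.get(str(hh))
--             if v in ("yes", "no"):
--                 return v
--         return "no"
--
--     def next_yesno(h):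
--         for hh in range(h + 1, 25):
--             v = day_gpv.get(str(hh))
--             if v in ("yes", "no"):
--                 return v
--         return prev_yesno(h)
--
--     slots = [None] * 48  # 48 half-hours
--
--     for h in range(1, 25):
--         v = day_gpv.get(str(h), "no")
--         i = (h - 1) * 2
--         if v in ("yes", "no"):
--             slots[i] = v
--             slots[i + 1] = v
--         elif v in ("first", "second"):
--             slots[i] = prev_yesno(h)
--             slots[i + 1] = next_yesno(h)
--         else:
--             slots[i] = "no"
--             slots[i + 1] = "no"
--
--     def t(i):
--         m = i * 30
--         return f"{m // 60:02d}:{m % 60:02d}"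
--
--     def icon(v):
--         return "✅" if v == "yes" else "❌"
--
--     out = []
--     start = 0
--     cur = slots[0]
--     for i in range(1, 48):
--         if slots[i] != cur:
--             out.append((start, i, cur))
--             start = i
--             cur = slots[i]
--     out.append((start, 48, cur))
--
--     lines = []
--     for a, b, v in out:
--         lines.append(f"{t(a)}–{t(b)} — {icon(v)} {v}")
--     return "\n".join(lines)
-- ===== SOURCE B (Python) =====
-- def format_schedule_halfhour(day_gpv: dict) -> str:
--     """
--     Same output as A, computed with two linear passes (prev/next tables)
--     instead of per-hour nested scans, and a while-based run-length encoding.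
--     """
--     raw = [day_gpv.get(str(h)) for h in range(1, 25)]
--
--     # forward pass: prev[k] = nearest yes/no strictly before hour k+1, default "no"
--     prev = []
--     carry = "no"
--     for v in raw:
--         prev.append(carry)
--         if v in ("yes", "no"):
--             carry = v
--
--     # backward pass: nxt[k] = nearest yes/no strictly after hour k+1, else prev[k]
--     nxt = []
--     carry = None
--     for k in range(23, -1, -1):
--         nxt.append(carry if carry is not None else prev[k])
--         if raw[k] in ("yes", "no"):
--             carry = raw[k]
--     nxt.reverse()
--
--     slots = []
--     for k in range(24):
--         v = raw[k] if raw[k] is not None else "no"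
--         if v in ("yes", "no"):
--             slots += [v, v]
--         elif v in ("first", "second"):
--             slots += [prev[k], nxt[k]]
--         else:
--             slots += ["no", "no"]
--
--     def t(i):
--         m = i * 30
--         return f"{m // 60:02d}:{m % 60:02d}"
--
--     lines = []
--     i = 0
--     while i < 48:
--         v = slots[i]
--         j = i + 1
--         while j < 48 and slots[j] == v:
--             j += 1
--         lines.append(f"{t(i)}–{t(j)} — {'✅' if v == 'yes' else '❌'} {v}")
--         i = j
--     return "\n".join(lines)
-- ===== Notes on version B (the rewrite author's own statement) =====
-- stated objective: alternative
-- what changed: Replaces A's per-hour nested prev/next rescans (prev_yesno/next_yesno scanning up to all 24 hours for each first/second hour) and its index-assignment slot array with one forward pass building a prev table, one backward pass building a next table, slot construction by appending pairs, and a while-based run-length grouping over the 48 slots.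
import Mathlib
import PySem

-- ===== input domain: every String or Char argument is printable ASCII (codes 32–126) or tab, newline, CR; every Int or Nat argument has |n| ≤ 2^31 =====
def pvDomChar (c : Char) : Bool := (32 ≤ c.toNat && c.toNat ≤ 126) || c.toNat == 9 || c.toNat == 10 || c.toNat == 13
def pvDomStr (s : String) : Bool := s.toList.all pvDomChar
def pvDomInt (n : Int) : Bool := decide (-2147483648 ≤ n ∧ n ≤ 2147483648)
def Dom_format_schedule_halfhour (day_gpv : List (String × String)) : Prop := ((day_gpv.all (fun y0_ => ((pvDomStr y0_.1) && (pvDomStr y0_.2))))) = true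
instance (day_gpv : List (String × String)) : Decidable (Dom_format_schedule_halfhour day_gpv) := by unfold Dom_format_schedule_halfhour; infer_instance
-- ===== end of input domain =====

-- B replaces A's per-hour nested prev/next scans by two linear prev/next table passes
-- and a while-style run-length grouping; objective: alternative (same output, different algorithm).

-- shared helpers (identical helper code in both Pythons: dict.get, 02d padding, t(i))
def pvGet (day_gpv : List (String × String)) (k : String) : Option String :=
  PySem.Dict.get? (PySem.Dict.mk day_gpv) k

def pvPad2 (n : Int) : String :=
  let s := PySem.Int.toStr n
  if PySem.Str.len s < 2 then "0" ++ s else s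

def pvT (i : Int) : String :=
  let m := i * 30
  pvPad2 (PySem.Int.floordiv m 60) ++ ":" ++ pvPad2 (PySem.Int.mod m 60)

-- ===== PORT A =====
def prevLoopA (d : List (String × String)) : List Int → String
  | [] => "no"
  | hh :: rest =>
    let v := pvGet d (PySem.Int.toStr hh)
    if v == some "yes" || v == some "no" then v.getD "" else prevLoopA d rest

def prev_yesnoA (d : List (String × String)) (h : Int) : String :=
  prevLoopA d (PySem.List.pyRange (h - 1) 0 (-1))

def nextLoopA (d : List (String × String)) (h : Int) : List Int → String
  | [] => prev_yesnoA d h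
  | hh :: rest =>
    let v := pvGet d (PySem.Int.toStr hh)
    if v == some "yes" || v == some "no" then v.getD "" else nextLoopA d h rest

def next_yesnoA (d : List (String × String)) (h : Int) : String :=
  nextLoopA d h (PySem.List.pyRange (h + 1) 25 1)

def pvIconA (v : Option String) : String := if v == some "yes" then "✅" else "❌"

def fillA (d : List (String × String)) : List (Option String) :=
  (PySem.List.pyRange 1 25 1).foldl (fun slots h =>
    if (pvGet d (PySem.Int.toStr h)).getD "no" == "yes" ||
        (pvGet d (PySem.Int.toStr h)).getD "no" == "no" then
      PySem.List.pySetD (PySem.List.pySetD slots ((h - 1) * 2)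
        (some ((pvGet d (PySem.Int.toStr h)).getD "no"))) ((h - 1) * 2 + 1)
        (some ((pvGet d (PySem.Int.toStr h)).getD "no"))
    else if (pvGet d (PySem.Int.toStr h)).getD "no" == "first" ||
        (pvGet d (PySem.Int.toStr h)).getD "no" == "second" then
      PySem.List.pySetD (PySem.List.pySetD slots ((h - 1) * 2)
        (some (prev_yesnoA d h))) ((h - 1) * 2 + 1) (some (next_yesnoA d h))
    else
      PySem.List.pySetD (PySem.List.pySetD slots ((h - 1) * 2) (some "no")) ((h - 1) * 2 + 1)
        (some "no"))
    (List.replicate 48 none)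

def grpLoopA (out : List (Int × Int × Option String)) (start : Int) (cur : Option String)
    (i : Int) : List (Option String) → List (Int × Int × Option String) × Int × Option String
  | [] => (out, start, cur)
  | s :: rest =>
    if s ≠ cur then grpLoopA (out ++ [(start, i, cur)]) i s (i + 1) rest
    else grpLoopA out start cur (i + 1) rest

def format_schedule_halfhour (day_gpv : List (String × String)) : String :=
  let slots := fillA day_gpv
  let cur0 := PySem.List.pyGetD slots 0 none
  let r := grpLoopA [] 0 cur0 1 slots.tail
  let out := r.1 ++ [(r.2.1, 48, r.2.2)]
  let lines := out.map (fun p =>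
    pvT p.1 ++ "–" ++ pvT p.2.1 ++ " — " ++ pvIconA p.2.2 ++ " " ++ p.2.2.getD "None")
  PySem.Str.join "\n" lines

-- ===== PORT B =====
def rawB (d : List (String × String)) : List (Option String) :=
  (PySem.List.pyRange 1 25 1).map (fun h => pvGet d (PySem.Int.toStr h))

def prevB (raw : List (Option String)) : List String × String :=
  raw.foldl (fun st v =>
    (st.1 ++ [st.2],
     match v with
     | some s => if s == "yes" || s == "no" then s else st.2
     | none => st.2))
    ([], "no")

def nxtB (raw : List (Option String)) (prev : List String) : List String :=
  (((raw.zip prev).reverse).foldl (fun (st : List String × Option String) p =>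
    (st.1 ++ [st.2.getD p.2],
     match p.1 with
     | some s => if s == "yes" || s == "no" then some s else st.2
     | none => st.2))
    ([], none)).1.reverse

def slotsB (raw : List (Option String)) (prev nxt : List String) : List String :=
  (raw.zip (prev.zip nxt)).foldl (fun acc q =>
    if q.1.getD "no" == "yes" || q.1.getD "no" == "no" then acc ++ [q.1.getD "no", q.1.getD "no"]
    else if q.1.getD "no" == "first" || q.1.getD "no" == "second" then acc ++ [q.2.1, q.2.2]
    else acc ++ ["no", "no"]) []

def grpB (i : Int) : List String → List String
  | [] => []
  | v :: rest =>
    let run := rest.takeWhile (fun s => s == v)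
    let rest' := rest.dropWhile (fun s => s == v)
    let j := i + 1 + run.length
    (pvT i ++ "–" ++ pvT j ++ " — " ++ (if v == "yes" then "✅" else "❌") ++ " " ++ v)
      :: grpB j rest'
termination_by xs => xs.length
decreasing_by simpa using Nat.lt_succ_of_le (List.length_dropWhile_le _ _)

def format_schedule_halfhour_alt (day_gpv : List (String × String)) : String :=
  let raw := rawB day_gpv
  let prev := (prevB raw).1
  let nxt := nxtB raw prev
  let slots := slotsB raw prev nxt
  PySem.Str.join "\n" (grpB 0 slots)

-- ===== PRECONDITION & SPEC =====
def Spec_format_schedule_halfhour (day_gpv : List (String × String)) (out : String) : Prop := out = format_schedule_halfhour_alt day_gpv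
instance (day_gpv : List (String × String)) (out : String) : Decidable (Spec_format_schedule_halfhour day_gpv out) := by unfold Spec_format_schedule_halfhour; infer_instance

-- ===== CLAIM (what is proved, stated in full; the proofs are below) =====
def Claim_equal_format_schedule_halfhour : Prop := ∀ (day_gpv : List (String × String)), Dom_format_schedule_halfhour day_gpv → Spec_format_schedule_halfhour day_gpv (format_schedule_halfhour day_gpv)

-- ===== LEMMAS AND PROOFS =====

-- the "yes"/"no" filter of an optional dict value
def res? (v : Option String) : Option String :=
  match v with
  | some s => if s == "yes" || s == "no" then some s else none
  | none => none

theorem res?_if_getD (v : Option String) (c : String) :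
    (if v == some "yes" || v == some "no" then v.getD "" else c) = (res? v).getD c := by
  cases v with
  | none => simp [res?]
  | some s =>
    simp only [res?]
    by_cases h1 : s = "yes" <;> by_cases h2 : s = "no" <;> simp [h1, h2]

theorem res?_match_getD (v : Option String) (c : String) :
    (match v with
     | some s => if s == "yes" || s == "no" then s else c
     | none => c) = (res? v).getD c := by
  cases v with
  | none => simp [res?]
  | some s =>
    simp only [res?]
    by_cases h1 : s = "yes" <;> by_cases h2 : s = "no" <;> simp [h1, h2]

theorem res?_match_or (v c' : Option String) :
    (match v with
     | some s => if s == "yes" || s == "no" then some s else c'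
     | none => c') = (res? v).or c' := by
  cases v with
  | none => simp [res?]
  | some s =>
    simp only [res?]
    by_cases h1 : s = "yes" <;> by_cases h2 : s = "no" <;> simp [h1, h2]

theorem prevA_one (d : List (String × String)) : prev_yesnoA d 1 = "no" := by
  simp [prev_yesnoA, prevLoopA]

theorem prevA_succ (d : List (String × String)) (h : Int) (hh : 1 ≤ h) :
    prev_yesnoA d (h + 1) = (res? (pvGet d (PySem.Int.toStr h))).getD (prev_yesnoA d h) := by
  unfold prev_yesnoA
  have h1 : (h + 1 - 1 : Int) = h := by ring
  rw [h1, PySem.List.pyRange_neg_one_cons (by omega : (0:Int) < h)]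
  simp only [prevLoopA]
  exact res?_if_getD _ _

theorem nextLoopA_eq (d : List (String × String)) (h : Int) (l : List Int) :
    nextLoopA d h l =
      (List.findSome? (fun hh => res? (pvGet d (PySem.Int.toStr hh))) l).getD (prev_yesnoA d h) := by
  induction l with
  | nil => simp [nextLoopA]
  | cons hh rest ih =>
    simp only [nextLoopA, List.findSome?_cons, ih]
    rw [res?_if_getD (pvGet d (PySem.Int.toStr hh))]
    cases res? (pvGet d (PySem.Int.toStr hh)) <;> simp

-- A's hour value / slot pair, as functions of the hour
def vrawA (d : List (String × String)) (h : Int) : Option String := pvGet d (PySem.Int.toStr h)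

def pairA (d : List (String × String)) (h : Int) : List (Option String) :=
  if (vrawA d h).getD "no" == "yes" || (vrawA d h).getD "no" == "no" then
    [some ((vrawA d h).getD "no"), some ((vrawA d h).getD "no")]
  else if (vrawA d h).getD "no" == "first" || (vrawA d h).getD "no" == "second" then
    [some (prev_yesnoA d h), some (next_yesnoA d h)]
  else [some "no", some "no"]

def pairB (q : Option String × String × String) : List String :=
  if q.1.getD "no" == "yes" || q.1.getD "no" == "no" then [q.1.getD "no", q.1.getD "no"]
  else if q.1.getD "no" == "first" || q.1.getD "no" == "second" then [q.2.1, q.2.2]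
  else ["no", "no"]

theorem prevB_eq (d : List (String × String)) (n : Nat) :
    prevB ((PySem.List.pyRange 1 (1 + (n : Int)) 1).map (vrawA d)) =
      ((PySem.List.pyRange 1 (1 + (n : Int)) 1).map (fun k => prev_yesnoA d k),
       prev_yesnoA d (1 + (n : Int))) := by
  induction n with
  | zero =>
    simp [PySem.List.pyRange_one_eq_nil (by norm_num : (1:Int) ≤ 1), prevB, prevA_one]
  | succ m ih =>
    have hsplit : PySem.List.pyRange 1 (1 + ((m + 1 : Nat) : Int)) 1 =
        PySem.List.pyRange 1 (1 + (m : Int)) 1 ++ [1 + (m : Int)] := by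
      have : (1 + ((m + 1 : Nat) : Int)) = (1 + (m : Int)) + 1 := by push_cast; ring
      rw [this, PySem.List.pyRange_one_succ_right (by omega)]
    rw [hsplit]
    simp only [List.map_append, List.foldl_append, prevB] at ih ⊢
    rw [ih]
    simp only [List.map_cons, List.map_nil, List.foldl_cons, List.foldl_nil]
    rw [Prod.mk.injEq]
    refine ⟨rfl, ?_⟩
    rw [res?_match_getD]; simp only [vrawA]; rw [← prevA_succ d (1 + (m : Int)) (by omega)]
    congr 1

def nxtSpec : List (Option String) → List String → List String
  | _ :: rs, p :: ps => (List.findSome? res? rs).getD p :: nxtSpec rs ps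
  | _, _ => []

theorem nxtB_foldr (raws : List (Option String)) (prevs : List String)
    (hlen : raws.length = prevs.length) :
    (raws.zip prevs).foldr
      (fun p (st : List String × Option String) =>
        (st.1 ++ [st.2.getD p.2],
         match p.1 with
         | some s => if s == "yes" || s == "no" then some s else st.2
         | none => st.2))
      ([], none)
    = ((nxtSpec raws prevs).reverse, List.findSome? res? raws) := by
  induction raws generalizing prevs with
  | nil =>
    cases prevs with
    | nil => simp [nxtSpec]
    | cons p ps => simp at hlen
  | cons r rs ih =>
    cases prevs with
    | nil => simp at hlen
    | cons p ps =>
      simp only [List.length_cons, Nat.add_right_cancel_iff] at hlen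
      simp only [List.zip_cons_cons, List.foldr_cons, ih ps hlen]
      rw [Prod.mk.injEq]
      constructor
      · simp [nxtSpec]
      · rw [res?_match_or, List.findSome?_cons]
        cases res? r <;> simp [Option.or]

theorem nxtSpec_eq (d : List (String × String)) (n : Nat) (a : Int) (ha : 25 - a ≤ n) :
    nxtSpec ((PySem.List.pyRange a 25 1).map (vrawA d))
            ((PySem.List.pyRange a 25 1).map (fun k => prev_yesnoA d k)) =
      (PySem.List.pyRange a 25 1).map (fun k => next_yesnoA d k) := by
  induction n generalizing a with
  | zero =>
    rw [PySem.List.pyRange_one_eq_nil (by omega)]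
    simp [nxtSpec]
  | succ m ih =>
    by_cases hlt : a < 25
    · rw [PySem.List.pyRange_one_cons hlt]
      simp only [List.map_cons, nxtSpec]
      rw [List.cons.injEq]
      constructor
      · rw [next_yesnoA, nextLoopA_eq, List.findSome?_map]
        rfl
      · exact ih (a + 1) (by omega)
    · rw [PySem.List.pyRange_one_eq_nil (by omega)]
      simp [nxtSpec]

theorem pairA_eq_map_some (d : List (String × String)) (h : Int) :
    pairA d h = (pairB (vrawA d h, prev_yesnoA d h, next_yesnoA d h)).map some := by
  unfold pairA pairB
  split_ifs <;> simp

theorem length_pairB (q : Option String × String × String) : (pairB q).length = 2 := by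
  unfold pairB; split_ifs <;> simp

theorem length_pairA (d : List (String × String)) (h : Int) : (pairA d h).length = 2 := by
  rw [pairA_eq_map_some]; simp [length_pairB]

theorem slotsB_eq_flatMap (d : List (String × String)) (R : List Int) :
    slotsB (R.map (vrawA d)) (R.map (fun k => prev_yesnoA d k)) (R.map (fun k => next_yesnoA d k)) =
      R.flatMap (fun h => pairB (vrawA d h, prev_yesnoA d h, next_yesnoA d h)) := by
  unfold slotsB
  rw [List.zip_map', List.zip_map']
  have hfun : (fun (acc : List String) (q : Option String × String × String) =>
      if q.1.getD "no" == "yes" || q.1.getD "no" == "no" then acc ++ [q.1.getD "no", q.1.getD "no"]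
      else if q.1.getD "no" == "first" || q.1.getD "no" == "second" then acc ++ [q.2.1, q.2.2]
      else acc ++ ["no", "no"]) = fun acc q => acc ++ pairB q := by
    funext acc q; simp only [pairB]; split_ifs <;> rfl
  rw [hfun, PySem.List.foldl_append_eq_flatMap]
  simp [List.flatMap_map]

theorem pvSetSet (x y : Option String) (F rest : List (Option String)) :
    ((F ++ (none :: none :: rest)).set F.length x).set (F.length + 1) y = F ++ x :: y :: rest := by
  simp

theorem fillA_eq (d : List (String × String)) (n : Nat) (hn : n ≤ 24) :
  (PySem.List.pyRange 1 (1 + (n : Int)) 1).foldl (fun slots h =>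
    if (pvGet d (PySem.Int.toStr h)).getD "no" == "yes" ||
        (pvGet d (PySem.Int.toStr h)).getD "no" == "no" then
      PySem.List.pySetD (PySem.List.pySetD slots ((h - 1) * 2)
        (some ((pvGet d (PySem.Int.toStr h)).getD "no"))) ((h - 1) * 2 + 1)
        (some ((pvGet d (PySem.Int.toStr h)).getD "no"))
    else if (pvGet d (PySem.Int.toStr h)).getD "no" == "first" ||
        (pvGet d (PySem.Int.toStr h)).getD "no" == "second" then
      PySem.List.pySetD (PySem.List.pySetD slots ((h - 1) * 2)
        (some (prev_yesnoA d h))) ((h - 1) * 2 + 1) (some (next_yesnoA d h))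
    else
      PySem.List.pySetD (PySem.List.pySetD slots ((h - 1) * 2) (some "no")) ((h - 1) * 2 + 1)
        (some "no"))
    (List.replicate 48 none)
    = ((PySem.List.pyRange 1 (1 + (n : Int)) 1).flatMap (pairA d)) ++
        List.replicate (48 - 2 * n) none := by
  induction n with
  | zero => norm_num
  | succ m ih =>
    have hsplit : PySem.List.pyRange 1 (1 + ((m + 1 : Nat) : Int)) 1 =
        PySem.List.pyRange 1 (1 + (m : Int)) 1 ++ [1 + (m : Int)] := by
      have : (1 + ((m + 1 : Nat) : Int)) = (1 + (m : Int)) + 1 := by push_cast; ring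
      rw [this, PySem.List.pyRange_one_succ_right (by omega)]
    rw [hsplit, List.foldl_append, ih (by omega)]
    simp only [List.foldl_cons, List.foldl_nil, List.flatMap_append, List.flatMap_cons,
      List.flatMap_nil, List.append_nil]
    have hF : ((PySem.List.pyRange 1 (1 + (m : Int)) 1).flatMap (pairA d)).length = 2 * m := by
      rw [List.length_flatMap]
      have : ((PySem.List.pyRange 1 (1 + (m : Int)) 1).map fun a => (pairA d a).length)
          = (PySem.List.pyRange 1 (1 + (m : Int)) 1).map fun _ => 2 := by
        exact List.map_congr_left (fun a _ => length_pairA d a)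
      rw [this, List.map_const', List.sum_replicate, PySem.List.length_pyRange_one]
      simp [smul_eq_mul]; ring
    have hi : ((1 + (m : Int)) - 1) * 2 = ((2 * m : Nat) : Int) := by push_cast; ring
    have hi1 : ((1 + (m : Int)) - 1) * 2 + 1 = ((2 * m + 1 : Nat) : Int) := by push_cast; ring
    have hrepl : 48 - 2 * m = (48 - 2 * (m + 1)) + 1 + 1 := by omega
    rw [hi]
    have hi1' : ((2 * m : Nat) : Int) + 1 = ((2 * m + 1 : Nat) : Int) := by push_cast; ring
    rw [hi1']
    simp only [PySem.List.pySetD_natCast]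
    rw [hrepl, List.replicate_succ, List.replicate_succ]
    rw [show (2 * m : Nat) = ((PySem.List.pyRange 1 (1 + (m : Int)) 1).flatMap (pairA d)).length
          from hF.symm]
    split_ifs <;>
      rw [pvSetSet] <;>
      simp [pairA, vrawA, *]

-- formatting of one segment
def fmtB (a b : Int) (v : String) : String :=
  pvT a ++ "–" ++ pvT b ++ " — " ++ (if v == "yes" then "✅" else "❌") ++ " " ++ v

def fmtA (p : Int × Int × Option String) : String :=
  pvT p.1 ++ "–" ++ pvT p.2.1 ++ " — " ++ pvIconA p.2.2 ++ " " ++ p.2.2.getD "None"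

theorem fmtA_some (a b : Int) (v : String) : fmtA (a, b, some v) = fmtB a b v := by
  simp [fmtA, fmtB, pvIconA]

-- run-length segments of a slot list, shared characterisation of both groupings
def runsSpec (start : Int) (v : String) (i : Int) : List String → List String
  | [] => [fmtB start i v]
  | x :: xs =>
    if x == v then runsSpec start v (i + 1) xs
    else fmtB start i v :: runsSpec i x (i + 1) xs

theorem runsSpec_group (xs : List String) : ∀ (start v i),
    runsSpec start v i xs =
      match xs.dropWhile (fun s => s == v) with
      | [] => [fmtB start (i + ((xs.takeWhile (fun s => s == v)).length : Int)) v]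
      | w :: r' =>
        fmtB start (i + ((xs.takeWhile (fun s => s == v)).length : Int)) v ::
          runsSpec (i + ((xs.takeWhile (fun s => s == v)).length : Int)) w
            (i + ((xs.takeWhile (fun s => s == v)).length : Int) + 1) r' := by
  induction xs with
  | nil => intro start v i; simp [runsSpec]
  | cons x xs' ih =>
    intro start v i
    by_cases hx : x = v
    · subst hx
      rw [runsSpec]
      simp only [beq_self_eq_true, if_true, List.dropWhile_cons, List.takeWhile_cons]
      rw [ih]
      have harith : ∀ tw : Nat, (i + 1) + (tw : Int) = i + ((tw + 1 : Nat) : Int) := by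
        intro tw; push_cast; ring
      cases h : xs'.dropWhile (fun s => s == x) with
      | nil => simp [harith]
      | cons w r' => simp [harith]
    · have hxv : (x == v) = false := by simp [hx]
      rw [runsSpec]
      simp [hxv]

theorem grpLoopA_eq (xs : List String) :
    ∀ (out : List (Int × Int × Option String)) (start : Int) (v : String) (i : Int),
    ((grpLoopA out start (some v) i (xs.map some)).1 ++
      [((grpLoopA out start (some v) i (xs.map some)).2.1, i + (xs.length : Int),
        (grpLoopA out start (some v) i (xs.map some)).2.2)]).map fmtA
    = out.map fmtA ++ runsSpec start v i xs := by
  induction xs with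
  | nil =>
    intro out start v i
    simp [grpLoopA, runsSpec, fmtA_some]
  | cons x xs' ih =>
    intro out start v i
    by_cases hx : x = v
    · subst hx
      have hstep : grpLoopA out start (some x) i ((x :: xs').map some) =
          grpLoopA out start (some x) (i + 1) (xs'.map some) := by
        simp [grpLoopA]
      rw [hstep]
      have hlen : i + ((x :: xs').length : Int) = (i + 1) + (xs'.length : Int) := by
        simp; ring
      rw [hlen, ih, runsSpec]
      simp
    · have hstep : grpLoopA out start (some v) i ((x :: xs').map some) =
          grpLoopA (out ++ [(start, i, some v)]) i (some x) (i + 1) (xs'.map some) := by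
        simp [grpLoopA, hx]
      rw [hstep]
      have hlen : i + ((x :: xs').length : Int) = (i + 1) + (xs'.length : Int) := by
        simp; ring
      rw [hlen, ih]
      have hxv : (x == v) = false := by simp [hx]
      rw [runsSpec]
      simp [hxv, fmtA_some]

theorem grpB_cons (n : Nat) : ∀ (rest : List String), rest.length ≤ n →
    ∀ (v : String) (i : Int), grpB i (v :: rest) = runsSpec i v (i + 1) rest := by
  induction n with
  | zero =>
    intro rest hlen v i
    have : rest = [] := List.eq_nil_of_length_eq_zero (Nat.le_zero.mp hlen)
    subst this
    rw [grpB, runsSpec]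
    simp [grpB, fmtB]
  | succ n ih =>
    intro rest hlen v i
    rw [grpB, runsSpec_group]
    cases h : rest.dropWhile (fun s => s == v) with
    | nil => simp [grpB, fmtB]
    | cons w r' =>
      have hr' : r'.length ≤ n := by
        have := List.length_dropWhile_le (fun s => s == v) rest
        rw [h] at this; simp at this; omega
      rw [ih r' hr' w (i + 1 + ((rest.takeWhile (fun s => s == v)).length : Int))]
      simp only [fmtB]

-- ===== VERDICT (by name: the statement is the Claim_ definition above) =====
theorem pairB_shape (q : Option String × String × String) : ∃ a b, pairB q = [a, b] := by
  unfold pairB; split_ifs <;> exact ⟨_, _, rfl⟩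

theorem format_schedule_halfhour_spec : Claim_equal_format_schedule_halfhour := by
  intro d _
  show format_schedule_halfhour d = format_schedule_halfhour_alt d
  have hraw : rawB d = (PySem.List.pyRange 1 25 1).map (vrawA d) := rfl
  have hprev := prevB_eq d 24
  norm_num at hprev
  have hnxt : nxtB (rawB d) ((prevB (rawB d)).1) =
      (PySem.List.pyRange 1 25 1).map (fun k => next_yesnoA d k) := by
    rw [hraw, hprev]
    unfold nxtB
    rw [List.foldl_reverse]
    rw [nxtB_foldr _ _ (by simp)]
    rw [List.reverse_reverse]
    exact nxtSpec_eq d 24 1 (by norm_num)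
  have hslots : slotsB (rawB d) ((prevB (rawB d)).1) (nxtB (rawB d) ((prevB (rawB d)).1)) =
      (PySem.List.pyRange 1 25 1).flatMap
        (fun h => pairB (vrawA d h, prev_yesnoA d h, next_yesnoA d h)) := by
    rw [hnxt, hraw, hprev]
    exact slotsB_eq_flatMap d _
  have hfill := fillA_eq d 24 (by norm_num)
  rw [show (1 + ((24:Nat):Int)) = 25 from by norm_num] at hfill
  simp only [show (48 - 2 * 24 : Nat) = 0 from rfl, List.replicate_zero, List.append_nil] at hfill
  have hfillA : fillA d = ((PySem.List.pyRange 1 25 1).flatMap (pairA d)) := by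
    unfold fillA; rw [hfill]
  have hAB : fillA d =
      ((PySem.List.pyRange 1 25 1).flatMap
        (fun h => pairB (vrawA d h, prev_yesnoA d h, next_yesnoA d h))).map some := by
    have hfun : pairA d =
        fun h => (pairB (vrawA d h, prev_yesnoA d h, next_yesnoA d h)).map some :=
      funext (pairA_eq_map_some d)
    rw [hfillA, hfun, ← List.map_flatMap]
  -- decompose B's slot list: it starts with the two slots of hour 1 and has length 48
  have hcons : PySem.List.pyRange 1 25 1 = 1 :: PySem.List.pyRange 2 25 1 := by
    rw [PySem.List.pyRange_one_cons (by norm_num)]; norm_num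
  obtain ⟨a, b, hab⟩ := pairB_shape (vrawA d 1, prev_yesnoA d 1, next_yesnoA d 1)
  have hflat : (PySem.List.pyRange 1 25 1).flatMap
      (fun h => pairB (vrawA d h, prev_yesnoA d h, next_yesnoA d h)) =
      a :: b :: (PySem.List.pyRange 2 25 1).flatMap
        (fun h => pairB (vrawA d h, prev_yesnoA d h, next_yesnoA d h)) := by
    rw [hcons, List.flatMap_cons, hab]; rfl
  have hBslots : slotsB (rawB d) ((prevB (rawB d)).1) (nxtB (rawB d) ((prevB (rawB d)).1)) =
      a :: b :: (PySem.List.pyRange 2 25 1).flatMap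
        (fun h => pairB (vrawA d h, prev_yesnoA d h, next_yesnoA d h)) := by
    rw [hslots, hflat]
  have hABc : fillA d = List.map some
      (a :: b :: (PySem.List.pyRange 2 25 1).flatMap
        (fun h => pairB (vrawA d h, prev_yesnoA d h, next_yesnoA d h))) := by
    rw [hAB, hflat]
  have hlen : ((PySem.List.pyRange 2 25 1).flatMap
      (fun h => pairB (vrawA d h, prev_yesnoA d h, next_yesnoA d h))).length = 46 := by
    rw [List.length_flatMap]
    have : ((PySem.List.pyRange 2 25 1).map
        fun h => (pairB (vrawA d h, prev_yesnoA d h, next_yesnoA d h)).length)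
        = (PySem.List.pyRange 2 25 1).map fun _ => 2 :=
      List.map_congr_left (fun h _ => length_pairB _)
    rw [this, List.map_const', List.sum_replicate, PySem.List.length_pyRange_one]
    decide
  set t := (PySem.List.pyRange 2 25 1).flatMap
    (fun h => pairB (vrawA d h, prev_yesnoA d h, next_yesnoA d h)) with ht
  unfold format_schedule_halfhour format_schedule_halfhour_alt
  dsimp only
  rw [hABc, hBslots]
  simp only [List.map_cons, List.tail_cons]
  have hcur0 : PySem.List.pyGetD (some a :: some b :: t.map some) 0 none = some a := by
    simp [PySem.List.pyGetD, PySem.List.pyIdx?, PySem.List.pyGet?,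
      show (0:Int) ≤ (t.length : Int) + 1 by positivity]
  rw [hcur0]
  have h48 : (48 : Int) = 1 + ((b :: t).length : Int) := by
    simp [hlen]
  rw [h48]
  rw [show (fun p : Int × Int × Option String =>
      pvT p.1 ++ "–" ++ pvT p.2.1 ++ " — " ++ pvIconA p.2.2 ++ " " ++ p.2.2.getD "None") = fmtA
    from rfl]
  have hmap : some b :: t.map some = (b :: t).map some := rfl
  rw [hmap, grpLoopA_eq (b :: t) [] 0 a 1]
  rw [grpB_cons (b :: t).length (b :: t) (le_refl _) a 0]
  norm_num
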